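-- pv_equiv track=rewrite | github.com/lukaszkurczab/food-scanner-ai-backend | app/services/notification_service.py | _normalize_weekdays
-- ===== SOURCE A (Python) =====
-- class NotificationPrefsValidationError(Exception):
--     """Raised when the notification preferences payload is invalid."""
--
-- def _normalize_weekdays(raw: object) -> list[int] | None:
--     if raw is None:
--         return None
--     if not isinstance(raw, list):
--         raise NotificationPrefsValidationError("Invalid weekdays.")
--     raw_days: list[object] = raw
--     days = sorted(
--         {
--             int(day)
--             for day in raw_days
--             if isinstance(day, int) and 0 <= day <= 6
--         }
--     )
--     if len(days) != len(raw_days):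
--         raise NotificationPrefsValidationError("Invalid weekdays.")
--     return days
-- ===== SOURCE B (Python) =====
-- class NotificationPrefsValidationError(Exception):
--     """Raised when the notification preferences payload is invalid."""
--
-- def _normalize_weekdays(raw: object) -> list[int] | None:
--     if raw is None:
--         return None
--     if not isinstance(raw, list):
--         raise NotificationPrefsValidationError("Invalid weekdays.")
--     seen: set[int] = set()
--     for day in raw:
--         if not isinstance(day, int) or not (0 <= day <= 6):
--             raise NotificationPrefsValidationError("Invalid weekdays.")
--         d = int(day)
--         if d in seen:
--             raise NotificationPrefsValidationError("Invalid weekdays.")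
--         seen.add(d)
--     return sorted(seen)
-- ===== Notes on version B (the rewrite author's own statement) =====
-- stated objective: simpler
-- what changed: B replaces the set-comprehension-then-length-comparison trick with one explicit validation pass maintaining a seen set, raising immediately on an out-of-range or duplicate day and returning sorted(seen).
import Mathlib
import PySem

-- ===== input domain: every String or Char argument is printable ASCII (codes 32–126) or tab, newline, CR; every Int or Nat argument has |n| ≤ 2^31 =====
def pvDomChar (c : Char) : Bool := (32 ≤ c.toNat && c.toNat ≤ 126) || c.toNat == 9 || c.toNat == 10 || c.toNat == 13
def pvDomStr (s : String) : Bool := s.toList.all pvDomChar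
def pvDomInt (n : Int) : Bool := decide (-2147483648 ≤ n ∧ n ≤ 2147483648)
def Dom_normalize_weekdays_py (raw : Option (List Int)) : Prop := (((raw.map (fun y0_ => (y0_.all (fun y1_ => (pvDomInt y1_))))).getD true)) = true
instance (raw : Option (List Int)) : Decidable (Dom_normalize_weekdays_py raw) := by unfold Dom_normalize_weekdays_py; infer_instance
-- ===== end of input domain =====

-- B replaces A's set-comprehension + length-comparison trick with one explicit validation
-- pass over the list keeping a seen set (objective: simpler). Equivalence is claimed on
-- Pre_ (the inputs where A returns normally); where A raises, both ports return `none`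
-- as an out-of-Pre_ marker.

-- ===== PORT A =====
-- A: build sorted(set of in-range elements); raise (here: none, outside Pre_) if the
-- length differs from the raw list's length; return the sorted list.
def normalize_weekdays_py (raw : Option (List Int)) : Option (List Int) :=
  match raw with
  | none => none
  | some raw_days =>
    let days := PySem.List.sorted
      (PySem.Set.ofList (raw_days.filter (fun day => decide (0 ≤ day ∧ day ≤ 6))))
      (fun x => x) false
    if days.length = raw_days.length then some days
    else none  -- NotificationPrefsValidationError: excluded by Pre_

-- ===== PORT B =====
-- B: one explicit pass; `none` from the loop = the exception (outside Pre_).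
def pvAltLoop (l : List Int) (seen : PySem.Set Int) : Option (PySem.Set Int) :=
  match l with
  | [] => some seen
  | day :: rest =>
    if ¬ (0 ≤ day ∧ day ≤ 6) then none  -- raise: excluded by Pre_
    else if PySem.Set.contains seen day then none  -- raise: excluded by Pre_
    else pvAltLoop rest (PySem.Set.add seen day)

def normalize_weekdays_py_alt (raw : Option (List Int)) : Option (List Int) :=
  match raw with
  | none => none
  | some l =>
    match pvAltLoop l PySem.Set.empty with
    | none => none  -- NotificationPrefsValidationError: excluded by Pre_
    | some seen => some (PySem.List.sorted seen (fun x => x) false)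

-- ===== PRECONDITION & SPEC =====
-- Pre_ excludes exactly the inputs on which A raises NotificationPrefsValidationError:
-- a list with a duplicate or with an element outside 0..6.
def Pre_normalize_weekdays_py (raw : Option (List Int)) : Prop :=
  ∀ l ∈ raw, l.Nodup ∧ ∀ d ∈ l, 0 ≤ d ∧ d ≤ 6
instance (raw : Option (List Int)) : Decidable (Pre_normalize_weekdays_py raw) := by
  unfold Pre_normalize_weekdays_py; infer_instance

def pvWitness_normalize_weekdays_py : Option (List Int) := some [3, 0, 6]

def Spec_normalize_weekdays_py (raw : Option (List Int)) (out : Option (List Int)) : Prop := out = normalize_weekdays_py_alt raw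
instance (raw : Option (List Int)) (out : Option (List Int)) : Decidable (Spec_normalize_weekdays_py raw out) := by unfold Spec_normalize_weekdays_py; infer_instance

-- ===== CLAIM (what is proved, stated in full; the proofs are below) =====
def Claim_equal_normalize_weekdays_py : Prop := ∀ (raw : Option (List Int)), Dom_normalize_weekdays_py raw → Pre_normalize_weekdays_py raw → Spec_normalize_weekdays_py raw (normalize_weekdays_py raw)

-- ===== LEMMAS AND PROOFS =====

-- Accumulating Set.add over a list that stays duplicate-free just appends it.
theorem pv_foldl_add_eq_append (l s : List Int) (h : (s ++ l).Nodup) :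
    l.foldl PySem.Set.add s = s ++ l := by
  induction l generalizing s with
  | nil => simp
  | cons d rest ih =>
    have hd : ¬ d ∈ s := by
      intro hm
      exact (List.disjoint_of_nodup_append h) hm (List.mem_cons_self ..)
    have : PySem.Set.add s d = s ++ [d] := by
      simp [PySem.Set.add, PySem.Set.contains] at *
      simp [hd]
    rw [List.foldl_cons, this, ih (s ++ [d]) (by simpa using h)]
    simp

theorem pv_ofList_eq_self (l : List Int) (h : l.Nodup) : PySem.Set.ofList l = l := by
  have := pv_foldl_add_eq_append l [] (by simpa using h)
  simpa [PySem.Set.ofList_eq_foldl] using this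

-- B's validation loop succeeds on a nodup in-range list, returning the appended seen set.
theorem pv_altLoop_ok (l s : List Int) (h : (s ++ l).Nodup)
    (hr : ∀ d ∈ l, 0 ≤ d ∧ d ≤ 6) :
    pvAltLoop l s = some (s ++ l) := by
  induction l generalizing s with
  | nil => simp [pvAltLoop]
  | cons d rest ih =>
    have hd : ¬ d ∈ s := by
      intro hm
      exact (List.disjoint_of_nodup_append h) hm (List.mem_cons_self ..)
    have hrange := hr d (List.mem_cons_self ..)
    have hadd : PySem.Set.add s d = s ++ [d] := by
      simp [PySem.Set.add, PySem.Set.contains] at *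
      simp [hd]
    have hcon : PySem.Set.contains s d = false := by
      simp [PySem.Set.contains, hd]
    rw [pvAltLoop, if_neg (by simp [hrange.1, hrange.2]), hcon]
    simp only [Bool.false_eq_true, if_false, hadd]
    rw [ih (s ++ [d]) (by simpa using h) (fun x hx => hr x (List.mem_cons_of_mem _ hx))]
    simp

-- ===== VERDICT (by name: the statement is the Claim_ definition above) =====
theorem normalize_weekdays_py_spec : Claim_equal_normalize_weekdays_py := by
  intro raw _ hpre
  unfold Spec_normalize_weekdays_py
  match raw with
  | none => rfl
  | some l =>
    obtain ⟨hnd, hr⟩ := hpre l rfl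
    have hfilt : l.filter (fun day => decide (0 ≤ day ∧ day ≤ 6)) = l := by
      rw [List.filter_eq_self]
      intro d hd; exact decide_eq_true (hr d hd)
    have hof : PySem.Set.ofList l = l := pv_ofList_eq_self l hnd
    have hloop : pvAltLoop l PySem.Set.empty = some l := by
      simpa [PySem.Set.empty] using pv_altLoop_ok l [] (by simpa using hnd) hr
    simp only [normalize_weekdays_py, normalize_weekdays_py_alt, hfilt, hof, hloop]
    rw [if_pos (by simp [PySem.List.length_sorted])]
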